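-- pv_equiv track=rewrite | github.com/TESTaLOD/TESTaLOD | cq_test_machine.py | json_comparer
-- ===== SOURCE A (Python) =====
-- def json_comparer(query_result, expected_result):
--     result_list = [x for x in expected_result if x in query_result]
--     lista = []
--     for x in expected_result:
--         diz = {}
--         if x in result_list:
--             diz['color'] = 'Green'
--         else:
--             diz['color'] = 'Red'
--         diz['content'] = x
--         lista.append(diz)
--
--     if len(result_list) == len(expected_result): # 10 su 10 (li trova tutti)
--         # TABELLA VERDE: per ogni elemento di expected_result
--         return True, None, lista
--     else:
--         var = len(expected_result) - len(result_list) # 0 su 10 (non ne trova nessuno)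
--         if var == len(expected_result):
--             return False, None, lista
--             # TABELLA ROSSA: per ogni elemento di expected_result
--         else:
--             check_list = [m for m in expected_result if m not in result_list] # da 1 a 9 (ne trova qualcuno)
--             #tabella colorata VERDE/ROSSA
--             return True, str(len(check_list)), lista
-- ===== SOURCE B (Python) =====
-- def json_comparer(query_result, expected_result):
--     # Single counting pass: no intermediate result_list/check_list.
--     match_count = 0
--     lista = []
--     for x in expected_result:
--         if x in query_result:
--             match_count += 1
--             lista.append({'color': 'Green', 'content': x})
--         else:
--             lista.append({'color': 'Red', 'content': x})
--     if match_count == len(expected_result):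
--         return True, None, lista
--     elif match_count == 0:
--         return False, None, lista
--     else:
--         return True, str(len(expected_result) - match_count), lista
-- ===== Notes on version B (the rewrite author's own statement) =====
-- stated objective: simpler
-- what changed: Replaces the three passes (membership comprehension, coloring loop, check_list comprehension) and both intermediate lists with one counting pass that colors and counts in a single loop over expected_result.
import Mathlib
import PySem

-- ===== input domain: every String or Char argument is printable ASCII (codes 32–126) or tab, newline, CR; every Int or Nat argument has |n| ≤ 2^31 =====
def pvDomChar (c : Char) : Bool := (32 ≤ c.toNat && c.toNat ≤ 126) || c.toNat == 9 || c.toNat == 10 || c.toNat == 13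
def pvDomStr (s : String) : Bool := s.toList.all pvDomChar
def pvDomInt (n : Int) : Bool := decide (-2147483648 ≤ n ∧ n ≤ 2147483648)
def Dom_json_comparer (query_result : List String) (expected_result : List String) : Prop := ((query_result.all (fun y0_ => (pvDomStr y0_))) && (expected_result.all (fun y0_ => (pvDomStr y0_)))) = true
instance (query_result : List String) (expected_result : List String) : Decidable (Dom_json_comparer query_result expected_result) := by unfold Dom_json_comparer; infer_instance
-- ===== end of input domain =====

-- B replaces A's three passes and two intermediate lists with one counting pass; return value proved equal on all inputs.


-- ===== PORT A =====
-- result_list = [x for x in expected_result if x in query_result]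
-- lista built by a second loop testing membership in result_list; check_list a third comprehension.
def json_comparer (query_result : List String) (expected_result : List String) : Bool × Option String × (List (List (String × String))) :=
  let result_list := expected_result.filter (fun x => query_result.contains x)
  let lista := expected_result.foldl
    (fun acc x =>
      acc ++ [[("color", if result_list.contains x then "Green" else "Red"), ("content", x)]]) []
  if result_list.length = expected_result.length then
    (true, none, lista)
  else
    let var := expected_result.length - result_list.length
    if var = expected_result.length then
      (false, none, lista)
    else
      let check_list := expected_result.filter (fun m => !result_list.contains m)
      (true, some (PySem.Int.toStr (check_list.length : Int)), lista)

-- ===== PORT B =====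
-- single pass: counter + output list built together, no intermediate lists
def json_comparer_alt (query_result : List String) (expected_result : List String) : Bool × Option String × (List (List (String × String))) :=
  let st := expected_result.foldl
    (fun (acc : Nat × List (List (String × String))) x =>
      if query_result.contains x then
        (acc.1 + 1, acc.2 ++ [[("color", "Green"), ("content", x)]])
      else
        (acc.1, acc.2 ++ [[("color", "Red"), ("content", x)]])) (0, [])
  if st.1 = expected_result.length then
    (true, none, st.2)
  else if st.1 = 0 then
    (false, none, st.2)
  else
    (true, some (PySem.Int.toStr ((expected_result.length : Int) - (st.1 : Int))), st.2)

-- ===== PRECONDITION & SPEC =====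
def Spec_json_comparer (query_result : List String) (expected_result : List String) (out : Bool × Option String × (List (List (String × String)))) : Prop := out = json_comparer_alt query_result expected_result
instance (query_result : List String) (expected_result : List String) (out : Bool × Option String × (List (List (String × String)))) : Decidable (Spec_json_comparer query_result expected_result out) := by unfold Spec_json_comparer; infer_instance

-- ===== CLAIM (what is proved, stated in full; the proofs are below) =====
def Claim_equal_json_comparer : Prop := ∀ (query_result : List String) (expected_result : List String), Dom_json_comparer query_result expected_result → Spec_json_comparer query_result expected_result (json_comparer query_result expected_result)

-- ===== LEMMAS AND PROOFS =====

-- B's fold, run from any accumulator, adds the match count and appends the colored rows.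
theorem pv_fold_B (q : List String) (e : List String) (n : Nat) (l : List (List (String × String))) :
    e.foldl (fun (acc : Nat × List (List (String × String))) x =>
      if q.contains x then
        (acc.1 + 1, acc.2 ++ [[("color", "Green"), ("content", x)]])
      else
        (acc.1, acc.2 ++ [[("color", "Red"), ("content", x)]])) (n, l)
    = (n + (e.filter (fun x => q.contains x)).length,
       l ++ e.map (fun x => [("color", if q.contains x then "Green" else "Red"), ("content", x)])) := by
  induction e generalizing n l with
  | nil => simp
  | cons h t ih =>
    by_cases hq : q.contains h = true
    · simp only [List.foldl_cons, hq, if_true, ih, List.filter_cons, List.map_cons]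
      refine Prod.ext ?_ ?_
      · simp; omega
      · simp
    · simp only [List.foldl_cons, hq, ih, List.filter_cons, List.map_cons]
      refine Prod.ext ?_ ?_
      · simp
      · simp

-- membership in result_list coincides with membership in query_result, for x drawn from expected_result
theorem pv_mem_rl (q e : List String) (x : String) (hx : x ∈ e) :
    (e.filter (fun y => q.contains y)).contains x = q.contains x := by
  by_cases hq : q.contains x = true <;> simp_all [List.contains_eq_mem, List.mem_filter]

-- A's second loop equals one map over expected_result with the query-membership color.
theorem pv_fold_A (q e : List String) (l : List (List (String × String))) (t : List String)
    (ht : ∀ x ∈ t, x ∈ e) :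
    t.foldl (fun acc x =>
      acc ++ [[("color", if (e.filter (fun y => q.contains y)).contains x then "Green" else "Red"), ("content", x)]]) l
    = l ++ t.map (fun x => [("color", if q.contains x then "Green" else "Red"), ("content", x)]) := by
  induction t generalizing l with
  | nil => simp
  | cons h tl ih =>
    rw [List.foldl_cons, ih _ (fun x hx => ht x (List.mem_cons_of_mem _ hx)),
        pv_mem_rl q e h (ht h (List.mem_cons_self ..))]
    simp

-- the missing items are exactly those not in query_result
theorem pv_check_list (q e : List String) :
    e.filter (fun m => !(e.filter (fun y => q.contains y)).contains m)
    = e.filter (fun m => !q.contains m) := by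
  apply List.filter_congr
  intro x hx
  rw [pv_mem_rl q e x hx]

theorem pv_len_split {α : Type} (p : α → Bool) (e : List α) :
    (e.filter (fun m => !p m)).length = e.length - (e.filter p).length := by
  induction e with
  | nil => simp
  | cons h t ih =>
    have hle : (t.filter p).length ≤ t.length := List.length_filter_le _ _
    by_cases hp : p h = true <;> simp [hp, ih] <;> omega

theorem json_comparer_eq (q e : List String) : json_comparer q e = json_comparer_alt q e := by
  have hle : (e.filter (fun y => q.contains y)).length ≤ e.length := List.length_filter_le _ _
  simp only [json_comparer, json_comparer_alt]
  rw [pv_fold_B q e 0 [], pv_fold_A q e [] e (fun x hx => hx), pv_check_list]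
  simp only [Nat.zero_add, List.nil_append]
  by_cases h1 : (e.filter (fun y => q.contains y)).length = e.length
  · rw [if_pos h1, if_pos h1]
  · rw [if_neg h1, if_neg h1]
    by_cases h2 : e.length - (e.filter (fun y => q.contains y)).length = e.length
    · have h0 : (e.filter (fun y => q.contains y)).length = 0 := by omega
      rw [if_pos h2, if_pos h0]
    · have h0 : ¬ (e.filter (fun y => q.contains y)).length = 0 := by omega
      rw [if_neg h2, if_neg h0]
      have : ((e.filter (fun m => !q.contains m)).length : Int)
          = (e.length : Int) - ((e.filter (fun y => q.contains y)).length : Int) := by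
        rw [pv_len_split (fun y => q.contains y) e]; omega
      rw [this]

-- ===== VERDICT (by name: the statement is the Claim_ definition above) =====
theorem json_comparer_spec : Claim_equal_json_comparer := by
  intro q e _
  unfold Spec_json_comparer
  exact json_comparer_eq q e
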